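-- pv_equiv track=rewrite | github.com/JulianWgs/candas | candas/dataframe.py | group_names
-- ===== SOURCE A (Python) =====
-- def group_names(names):
--     """
--     Group names of signals by similarity of name.
--
--     First all numbers are removed from the signal name. Then identical
--     numberless signal names are grouped together.
--
--     This function is used to cluster line on a plot.
--
--     Parameters
--     ----------
--     names : :obj:`list` of :obj:`str`
--         names of the signals to group.
--
--     Returns
--     -------
--     grouped_names : :obj:`dict` of :obj:`list` of :obj:`str`
--         Dictionary with the name without numbers as key and all signal names
--         with numbers as list items.
--
--     """
--     grouped_names = {}
--     for name in names:
--         # Remove all numbers from signal name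
--         name_without_numbers = "".join(i for i in name if not i.isdigit())
--         if name_without_numbers in grouped_names.keys():
--             grouped_names[name_without_numbers].append(name)
--         else:
--             grouped_names[name_without_numbers] = [name]
--
--     return grouped_names
-- ===== SOURCE B (Python) =====
-- def group_names(names):
--     """Two-pass rewrite: dedup the digit-stripped keys once, then build each
--     group with a filter comprehension (first-occurrence key order kept)."""
--     def strip(s):
--         return "".join(c for c in s if not c.isdigit())
--     keys = list(dict.fromkeys(map(strip, names)))
--     return {k: [n for n in names if strip(n) == k] for k in keys}
-- ===== Notes on version B (the rewrite author's own statement) =====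
-- stated objective: alternative
-- what changed: Replaces A's incremental dict build (membership test + append-or-create per name) with a two-pass scheme: one ordered dedup of the digit-stripped keys, then a filter comprehension per key building each group.
import Mathlib
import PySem

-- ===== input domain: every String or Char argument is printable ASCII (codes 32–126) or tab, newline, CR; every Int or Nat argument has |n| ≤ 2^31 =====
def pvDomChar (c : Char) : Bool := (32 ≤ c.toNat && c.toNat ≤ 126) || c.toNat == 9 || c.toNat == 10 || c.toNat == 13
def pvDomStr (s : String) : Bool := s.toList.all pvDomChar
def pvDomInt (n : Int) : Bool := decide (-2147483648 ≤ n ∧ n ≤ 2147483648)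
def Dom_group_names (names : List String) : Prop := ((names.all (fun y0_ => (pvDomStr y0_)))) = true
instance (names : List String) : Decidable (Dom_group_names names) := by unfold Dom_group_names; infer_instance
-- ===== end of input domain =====

-- B rebuilds the grouping in two passes (ordered key dedup, then one filter per key)
-- instead of A's incremental dict build; objective: alternative (same result, no speed claim).

-- shared key function: ''.join(c for c in name if not c.isdigit())
def stripDigits (s : String) : String :=
  String.ofList (s.toList.filter (fun c => !PySem.Chars.isdigit c))

-- ===== PORT A =====
def group_names (names : List String) : List (String × List String) :=
  (names.foldl
    (fun grouped name =>
      let nameWithoutNumbers := stripDigits name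
      if grouped.contains nameWithoutNumbers then
        grouped.modify nameWithoutNumbers [] (fun l => l ++ [name])
      else
        grouped.insert nameWithoutNumbers [name])
    PySem.Dict.empty).items

-- ===== PORT B =====
def group_names_alt (names : List String) : List (String × List String) :=
  let keys := PySem.List.dedup (names.map stripDigits)
  keys.map (fun k => (k, names.filter (fun n => stripDigits n == k)))

-- ===== PRECONDITION & SPEC =====
def Spec_group_names (names : List String) (out : List (String × List String)) : Prop := out = group_names_alt names
instance (names : List String) (out : List (String × List String)) : Decidable (Spec_group_names names out) := by unfold Spec_group_names; infer_instance

-- ===== CLAIM (what is proved, stated in full; the proofs are below) =====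
def Claim_equal_group_names : Prop := ∀ (names : List String), Dom_group_names names → Spec_group_names names (group_names names)

-- ===== LEMMAS AND PROOFS =====

-- A's if/else step is exactly a Dict.modify (the else branch inserts [] ++ [name]).
theorem group_names_step_eq (d : PySem.Dict String (List String)) (name : String) :
    (let k := stripDigits name
     if d.contains k then d.modify k [] (fun l => l ++ [name]) else d.insert k [name])
    = d.modify (stripDigits name) [] (fun l => l ++ [name]) := by
  unfold PySem.Dict.modify
  by_cases h : d.contains (stripDigits name) = true
  · simp [h]
  · have h' : d.contains (stripDigits name) = false := by simpa using h
    simp [h', PySem.Dict.getD_of_not_contains d [] h']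

theorem group_names_eq_alt (names : List String) :
    group_names names = group_names_alt names := by
  unfold group_names group_names_alt
  have hstep : (fun (grouped : PySem.Dict String (List String)) (name : String) =>
      let nameWithoutNumbers := stripDigits name
      if grouped.contains nameWithoutNumbers then
        grouped.modify nameWithoutNumbers [] (fun l => l ++ [name])
      else
        grouped.insert nameWithoutNumbers [name])
      = fun grouped name => grouped.modify (stripDigits name) [] (fun l => l ++ [name]) := by
    funext d name; exact group_names_step_eq d name
  rw [hstep]
  set D := names.foldl (fun d n => d.modify (stripDigits n) [] (fun l => l ++ [n]))
      PySem.Dict.empty with hD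
  have hkeys : D.keys = PySem.Set.ofList (names.map stripDigits) := by
    rw [hD, PySem.Dict.keys_foldl_modify_key]
    simp [PySem.Set.update_eq_append_filter, PySem.Set.contains]
  have hnodup : D.keys.Nodup := by
    rw [hD]
    exact PySem.Dict.nodup_keys_foldl_modify_key _ _ _ _ _ (by simp)
  have hgetD : ∀ k, D.getD k [] = names.filter (fun n => stripDigits n == k) := by
    intro k
    have hm : names.foldl (fun d n => d.modify (stripDigits n) [] (fun l => l ++ [n]))
        PySem.Dict.empty
        = (names.map (fun n => (stripDigits n, n))).foldl
            (fun d p => d.modify p.1 [] (fun l => l ++ [p.2])) PySem.Dict.empty := by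
      rw [List.foldl_map]
    rw [hD, hm, PySem.Dict.getD_foldl_modify_append]
    simp [List.filter_map, Function.comp_def]
  rw [PySem.Dict.items_eq_map_keys D hnodup [], hkeys]
  simp only [hgetD, PySem.List.dedup_eq_ofList]

-- ===== VERDICT (by name: the statement is the Claim_ definition above) =====
theorem group_names_spec : Claim_equal_group_names := by
  intro names _
  unfold Spec_group_names
  exact group_names_eq_alt names
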